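-- pv_equiv track=rewrite | github.com/tallstreet/jaikuenginepatch | middleware/strip_whitespace.py | _strip_from_values
-- ===== SOURCE A (Python) =====
-- def _strip_from_values(qdict):
--   copy = None
--   for k, v in qdict.items():
--     stripped = v.strip()
--     if not v == stripped:
--       if not copy:
--         copy = qdict.copy()
--       copy[k] = stripped
--   if copy:
--     return copy
--   return qdict
-- ===== SOURCE B (Python) =====
-- def _strip_from_values(qdict):
--   stripped = {k: v.strip() for k, v in qdict.items()}
--   if stripped == qdict:
--     return qdict
--   return stripped
-- ===== Notes on version B (the rewrite author's own statement) =====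
-- stated objective: simpler
-- what changed: Replaces the lazy copy-on-write loop with a sentinel flag by a build-all-then-compare two-phase structure: one dict comprehension strips every value, then a single equality test decides whether to return the original dict unchanged.
import Mathlib
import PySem

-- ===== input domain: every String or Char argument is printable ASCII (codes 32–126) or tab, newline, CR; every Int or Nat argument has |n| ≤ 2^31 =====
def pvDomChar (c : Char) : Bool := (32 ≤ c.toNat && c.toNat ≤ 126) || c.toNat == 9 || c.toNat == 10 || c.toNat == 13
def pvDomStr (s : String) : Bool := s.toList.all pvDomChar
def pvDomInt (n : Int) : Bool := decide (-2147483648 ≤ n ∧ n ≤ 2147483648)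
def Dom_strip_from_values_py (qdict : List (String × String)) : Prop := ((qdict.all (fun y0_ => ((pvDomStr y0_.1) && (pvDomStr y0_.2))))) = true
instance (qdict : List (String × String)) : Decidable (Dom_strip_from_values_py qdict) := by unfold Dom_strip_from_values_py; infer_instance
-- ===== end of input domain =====

-- B replaces A's lazy copy-on-write loop (sentinel `copy`) by build-all-then-compare: strip every value, one equality test.
-- Equivalence is about the RETURN VALUE only (Python A returns the original dict object itself when nothing changes; B returns an equal dict).

-- ===== PORT A =====
-- Python dict item assignment `d[k] = s`: overwrite the first entry with key k in place, append if absent (exact for insertion-ordered dicts)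
def pvDictSet (l : List (String × String)) (k s : String) : List (String × String) :=
  match l with
  | [] => [(k, s)]
  | (k', v') :: rest => if k' == k then (k, s) :: rest else (k', v') :: pvDictSet rest k s

-- one iteration of A's `for k, v in qdict.items():` loop body; `copy` is None or the working copy
def stripAStep (qdict : List (String × String)) (copy : Option (List (String × String)))
    (kv : String × String) : Option (List (String × String)) :=
  let stripped := PySem.Str.strip kv.2
  if !(kv.2 == stripped) then
    -- `if not copy: copy = qdict.copy()` (None and the empty dict are both falsy)
    let base := match copy with
      | none => qdict
      | some c => if c.isEmpty then qdict else c
    some (pvDictSet base kv.1 stripped)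
  else copy

def strip_from_values_py (qdict : List (String × String)) : List (String × String) :=
  match qdict.foldl (stripAStep qdict) none with
  | some c => if c.isEmpty then qdict else c   -- `if copy: return copy` / `return qdict`
  | none => qdict

-- ===== PORT B =====
def strip_from_values_py_alt (qdict : List (String × String)) : List (String × String) :=
  -- stripped = {k: v.strip() for k, v in qdict.items()}
  let stripped := qdict.foldl (fun acc kv => pvDictSet acc kv.1 (PySem.Str.strip kv.2)) []
  -- `if stripped == qdict: return qdict` — the comprehension keeps qdict's key order, so on
  -- dicts (unique keys) Python's order-insensitive dict == coincides with list equality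
  if stripped == qdict then qdict else stripped

-- ===== PRECONDITION & SPEC =====
-- Pre_ excludes association lists with duplicate keys: they represent no Python dict (a dict
-- collapses duplicate keys), so A's overwrite-first-duplicate behaviour there is an artefact of
-- the list encoding, not a behaviour of the Python function.
def Pre_strip_from_values_py (qdict : List (String × String)) : Prop :=
  (qdict.map Prod.fst).Nodup
instance (qdict : List (String × String)) : Decidable (Pre_strip_from_values_py qdict) := by
  unfold Pre_strip_from_values_py; infer_instance

def pvWitness_strip_from_values_py : (List (String × String)) := [("a", " x "), ("b", "y")]

def Spec_strip_from_values_py (qdict : List (String × String)) (out : List (String × String)) : Prop :=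
  out = strip_from_values_py_alt qdict
instance (qdict : List (String × String)) (out : List (String × String)) :
    Decidable (Spec_strip_from_values_py qdict out) := by unfold Spec_strip_from_values_py; infer_instance

-- ===== CLAIM (what is proved, stated in full; the proofs are below) =====
def Claim_equal_strip_from_values_py : Prop :=
  ∀ (qdict : List (String × String)), Dom_strip_from_values_py qdict →
    Pre_strip_from_values_py qdict →
    Spec_strip_from_values_py qdict (strip_from_values_py qdict)

-- ===== LEMMAS AND PROOFS =====

def pvStripPair (p : String × String) : String × String := (p.1, PySem.Str.strip p.2)

theorem pvDictSet_append (l : List (String × String)) (k s : String)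
    (h : k ∉ l.map Prod.fst) : pvDictSet l k s = l ++ [(k, s)] := by
  induction l with
  | nil => rfl
  | cons hd tl ih =>
    simp only [List.map_cons, List.mem_cons] at h
    push Not at h
    simp [pvDictSet, beq_iff_eq, Ne.symm h.1, ih h.2]

theorem pvDictSet_middle (pre suf : List (String × String)) (k v s : String)
    (h : k ∉ pre.map Prod.fst) :
    pvDictSet (pre ++ (k, v) :: suf) k s = pre ++ (k, s) :: suf := by
  induction pre with
  | nil => simp [pvDictSet]
  | cons hd tl ih =>
    simp only [List.map_cons, List.mem_cons] at h
    push Not at h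
    simp [pvDictSet, beq_iff_eq, Ne.symm h.1, ih h.2]

-- B's comprehension fold builds exactly the value-stripped list when keys are unique
theorem b_fold_char (l acc : List (String × String))
    (hd : ∀ p ∈ l, p.1 ∉ acc.map Prod.fst) (hn : (l.map Prod.fst).Nodup) :
    l.foldl (fun acc kv => pvDictSet acc kv.1 (PySem.Str.strip kv.2)) acc
      = acc ++ l.map pvStripPair := by
  induction l generalizing acc with
  | nil => simp
  | cons kv rest ih =>
    simp only [List.foldl_cons]
    rw [pvDictSet_append acc kv.1 _ (hd kv (by simp))]
    simp only [List.map_cons, List.nodup_cons] at hn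
    rw [ih (acc ++ [(kv.1, PySem.Str.strip kv.2)])
        (by
          intro p hp
          simp only [List.map_append, List.mem_append, List.map_cons, List.map_nil,
            List.mem_singleton]
          rintro (h1 | h2)
          · exact hd p (by simp [hp]) h1
          · exact hn.1 (h2 ▸ List.mem_map_of_mem hp))
        hn.2]
    simp [pvStripPair]

-- the state of A's loop after processing `pre` with `suf` remaining
def aState (pre suf : List (String × String)) : Option (List (String × String)) :=
  if pre.map pvStripPair = pre then none else some (pre.map pvStripPair ++ suf)

theorem a_loop_char (suf : List (String × String)) :
    ∀ pre : List (String × String), ((pre ++ suf).map Prod.fst).Nodup →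
    suf.foldl (stripAStep (pre ++ suf)) (aState pre suf)
      = aState (pre ++ suf) [] := by
  induction suf with
  | nil => intro pre _; simp
  | cons kv rest ih =>
    intro pre hn
    have hk : kv.1 ∉ pre.map Prod.fst := by
      have h2 := hn
      rw [List.map_append, List.nodup_append] at h2
      exact fun hmem => h2.2.2 kv.1 hmem kv.1 (by simp) rfl
    have hstep : stripAStep (pre ++ kv :: rest) (aState pre (kv :: rest)) kv
        = aState (pre ++ [kv]) rest := by
      by_cases hkv : kv.2 = PySem.Str.strip kv.2
      · -- value already stripped: state unchanged
        have hf : pvStripPair kv = kv := by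
          simp [pvStripPair, ← hkv]
        have hbeq : (kv.2 == PySem.Str.strip kv.2) = true := by
          simpa [beq_iff_eq] using hkv
        by_cases hpre : pre.map pvStripPair = pre
        · have : (pre ++ [kv]).map pvStripPair = pre ++ [kv] := by
            simp [hpre, hf]
          simp [stripAStep, hbeq, aState, hpre, this]
        · have : ¬ (pre ++ [kv]).map pvStripPair = pre ++ [kv] := by
            simp only [List.map_append, List.map_cons, List.map_nil]
            intro h
            exact hpre (List.append_inj_left' h (by simp))
          simp [stripAStep, hbeq, aState, hpre, hf]
      · -- value changes: write stripped value into the copy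
        have hbeq : (kv.2 == PySem.Str.strip kv.2) = false := by
          simpa [beq_iff_eq] using hkv
        have hne : ¬ (pre ++ [kv]).map pvStripPair = pre ++ [kv] := by
          simp only [List.map_append, List.map_cons, List.map_nil]
          intro h
          have := List.append_inj_right' h (by simp)
          simp only [List.cons.injEq] at this
          exact hkv (congrArg Prod.snd this.1).symm
        have hkmap : kv.1 ∉ (pre.map pvStripPair).map Prod.fst := by
          simpa [pvStripPair, Function.comp] using hk
        by_cases hpre : pre.map pvStripPair = pre
        · -- copy is still None: copy = qdict.copy(), then write
          have : pvDictSet (pre ++ kv :: rest) kv.1 (PySem.Str.strip kv.2)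
              = pre ++ (kv.1, PySem.Str.strip kv.2) :: rest := pvDictSet_middle _ _ _ _ _ hk
          have hpair : ¬ (kv.1, PySem.Str.strip kv.2) = kv := fun he => hkv (congrArg Prod.snd he).symm
          simp [stripAStep, hbeq, aState, hpre, this, pvStripPair, hpair]
        · -- copy exists (and is nonempty): write into it
          have hemp : (pre.map pvStripPair ++ kv :: rest).isEmpty = false := by
            simp
          have : pvDictSet (pre.map pvStripPair ++ kv :: rest) kv.1 (PySem.Str.strip kv.2)
              = pre.map pvStripPair ++ (kv.1, PySem.Str.strip kv.2) :: rest :=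
            pvDictSet_middle _ _ _ _ _ hkmap
          simp [stripAStep, hbeq, aState, hpre, hemp, this, pvStripPair]
    calc (kv :: rest).foldl (stripAStep (pre ++ kv :: rest)) (aState pre (kv :: rest))
        = rest.foldl (stripAStep ((pre ++ [kv]) ++ rest)) (aState (pre ++ [kv]) rest) := by
          rw [List.foldl_cons, hstep]; simp
      _ = aState ((pre ++ [kv]) ++ rest) [] := ih (pre ++ [kv]) (by simpa using hn)
      _ = aState (pre ++ kv :: rest) [] := by simp

-- ===== VERDICT (by name: the statement is the Claim_ definition above) =====
theorem strip_from_values_py_spec : Claim_equal_strip_from_values_py := by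
  intro qdict _ hpre
  unfold Spec_strip_from_values_py strip_from_values_py strip_from_values_py_alt
  have hloop := a_loop_char qdict [] (by simpa using hpre)
  have hb : qdict.foldl (fun acc kv => pvDictSet acc kv.1 (PySem.Str.strip kv.2)) []
      = qdict.map pvStripPair := by
    simpa using b_fold_char qdict [] (by simp) hpre
  simp only [List.nil_append] at hloop
  have hstate : aState [] qdict = none := by simp [aState]
  rw [hstate] at hloop
  rw [hloop, hb]
  by_cases h : qdict.map pvStripPair = qdict
  · simp [aState, h]
  · have hne : qdict ≠ [] := by rintro rfl; simp at h
    have hemp : (qdict.map pvStripPair).isEmpty = false := by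
      cases qdict with
      | nil => exact absurd rfl hne
      | cons a l => simp
    simp [aState, h, hemp, beq_iff_eq]
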